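-- pv_equiv track=rewrite | github.com/ntwrknrd/aoc-2025 | day06/solution.py | find_problem_boundaries
-- ===== SOURCE A (Python) =====
-- def find_problem_boundaries(lines: list[str]) -> list[tuple[int, int]]:
--     """Find where each problem starts and ends by looking for separator columns."""
--     # pad all lines to same width so we can scan columns cleanly
--     width = max(len(line) for line in lines)
--     padded = [line.ljust(width) for line in lines]
--
--     # a separator column is one where ALL rows are spaces
--     # we'll mark each column as True (separator) or False (part of a problem)
--     is_separator = []
--     for col in range(width):
--         all_spaces = all(row[col] == " " for row in padded)
--         is_separator.append(all_spaces)
--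
--     # now group consecutive non-separator columns into problem ranges
--     # each problem is a (start_col, end_col) tuple
--     problems = []
--     start = None
--     for col, sep in enumerate(is_separator):
--         if not sep and start is None:
--             # found the start of a new problem
--             start = col
--         elif sep and start is not None:
--             # found the end of a problem
--             problems.append((start, col))
--             start = None
--
--     # don't forget the last problem if it runs to the edge
--     if start is not None:
--         problems.append((start, width))
--
--     return problems
-- ===== SOURCE B (Python) =====
-- def find_problem_boundaries(lines: list[str]) -> list[tuple[int, int]]:
--     """Find where each problem starts and ends by looking for separator columns.
--
--     Different algorithm: instead of padding and scanning columns, collect each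
--     row's maximal non-space runs as half-open intervals, then compute their
--     union by sorting by start and fusing intervals that overlap or touch.
--     """
--     intervals = []
--     for line in lines:
--         i = 0
--         n = len(line)
--         while i < n:
--             if line[i] == " ":
--                 i += 1
--             else:
--                 j = i + 1
--                 while j < n and line[j] != " ":
--                     j += 1
--                 intervals.append((i, j))
--                 i = j
--     intervals.sort(key=lambda t: t[0])
--     problems = []
--     for s, e in intervals:
--         if problems and s <= problems[-1][1]:
--             if e > problems[-1][1]:
--                 problems[-1] = (problems[-1][0], e)
--         else:
--             problems.append((s, e))
--     return problems
-- ===== Notes on version B (the rewrite author's own statement) =====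
-- stated objective: alternative
-- what changed: A pads all rows to a common width, scans every column over all rows to build an is_separator list and groups it with a start/None state machine plus an end-of-loop fixup; B never builds a per-column mask: it collects each row's non-space runs as half-open intervals and computes their union by sorting by start and fusing intervals that overlap or touch.
import Mathlib
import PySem

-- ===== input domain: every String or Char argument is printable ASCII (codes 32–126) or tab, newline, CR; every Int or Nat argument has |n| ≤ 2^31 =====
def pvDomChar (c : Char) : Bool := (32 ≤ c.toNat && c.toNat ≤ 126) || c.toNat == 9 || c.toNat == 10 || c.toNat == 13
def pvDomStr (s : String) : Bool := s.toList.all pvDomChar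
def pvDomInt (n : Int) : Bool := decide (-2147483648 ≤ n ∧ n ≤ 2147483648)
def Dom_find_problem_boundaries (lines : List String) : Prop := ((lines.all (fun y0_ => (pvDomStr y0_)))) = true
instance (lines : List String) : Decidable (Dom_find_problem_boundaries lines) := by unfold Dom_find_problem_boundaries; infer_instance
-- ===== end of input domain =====

-- B replaces A's pad-to-width / per-column mask / start-None state machine by a different
-- algorithm: collect each row's non-space runs as half-open intervals, sort them by start
-- and fuse overlapping-or-touching intervals (interval union); no column mask is built.

-- ===== PORT A =====
-- width of each line; Python len(line)
def pvLen (l : String) : Nat := l.toList.length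

-- the 'for col, sep in enumerate(is_separator)' loop, state = (problems, start)
def pvALoop (col : Nat) (probs : List (Nat × Nat)) (start : Option Nat) :
    List Bool → List (Nat × Nat) × Option Nat
  | [] => (probs, start)
  | sep :: rest =>
    match start with
    | none => if sep then pvALoop (col + 1) probs none rest
              else pvALoop (col + 1) probs (some col) rest
    | some s => if sep then pvALoop (col + 1) (probs ++ [(s, col)]) none rest
                else pvALoop (col + 1) probs (some s) rest

-- the 'if start is not None: problems.append((start, width))' fixup
def pvAFix (acc : List (Nat × Nat) × Option Nat) (w : Nat) : List (Nat × Nat) :=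
  match acc.2 with
  | some s => acc.1 ++ [(s, w)]
  | none => acc.1

def find_problem_boundaries (lines : List String) : List (Int × Int) :=
  -- width = max(len(line) for line in lines); Python raises ValueError on [], excluded by Pre_
  let width := (PySem.List.max? (lines.map pvLen) id).getD 0
  -- line.ljust(width); exact: every line has length ≤ width
  let padded := lines.map (fun l => l.toList ++ List.replicate (width - pvLen l) ' ')
  -- row[col] is always in range on padded rows, so getD is exact here
  let is_separator := (List.range width).map
    (fun col => padded.all (fun row => row.getD col ' ' == ' '))
  (pvAFix (pvALoop 0 [] none is_separator) width).map (fun p => ((p.1 : Int), (p.2 : Int)))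

-- ===== PORT B =====
-- length of the inner 'while j < n and line[j] != " "' scan
def pvCntNS (cs : List Char) : Nat := (cs.takeWhile (fun ch => ch != ' ')).length

-- the outer 'while i < n' per-row run extraction, ported on the remaining character list
def pvRowRuns (i : Nat) : List Char → List (Nat × Nat)
  | [] => []
  | ch :: rest =>
    if ch == ' ' then pvRowRuns (i + 1) rest
    else (i, i + 1 + pvCntNS rest) :: pvRowRuns (i + 1 + pvCntNS rest) (rest.drop (pvCntNS rest))
  termination_by cs => cs.length
  decreasing_by
    · simp only [List.length_cons]; omega
    · simp only [List.length_drop, List.length_cons]; omega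

-- 'for line in lines: … intervals.append(…)' — all rows' runs, in order
def pvIntervals (lines : List String) : List (Nat × Nat) :=
  lines.foldl (fun acc l => acc ++ pvRowRuns 0 l.toList) []

-- one step of the merge loop; the accumulator holds the Python 'problems' list REVERSED
-- (append = cons, problems[-1] = head); it is reversed back at the end
def pvMergeStep (acc : List (Nat × Nat)) (p : Nat × Nat) : List (Nat × Nat) :=
  match acc with
  | [] => [p]
  | (s0, e0) :: rest =>
    if p.1 ≤ e0 then (if e0 < p.2 then (s0, p.2) :: rest else (s0, e0) :: rest)
    else p :: (s0, e0) :: rest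

def find_problem_boundaries_alt (lines : List String) : List (Int × Int) :=
  -- intervals.sort(key=lambda t: t[0]) — Python's stable sort by start
  let sortedIv := PySem.List.sorted (pvIntervals lines) (fun t => t.1) false
  ((sortedIv.foldl pvMergeStep []).reverse).map (fun p => ((p.1 : Int), (p.2 : Int)))

-- ===== PRECONDITION & SPEC =====
-- Pre_ excludes only the empty list, on which Python's max() in A raises ValueError.
def Pre_find_problem_boundaries (lines : List String) : Prop := lines ≠ []
instance (lines : List String) : Decidable (Pre_find_problem_boundaries lines) := by
  unfold Pre_find_problem_boundaries; infer_instance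

def pvWitness_find_problem_boundaries : List String := ["ab c"]

def Spec_find_problem_boundaries (lines : List String) (out : List (Int × Int)) : Prop :=
  out = find_problem_boundaries_alt lines
instance (lines : List String) (out : List (Int × Int)) :
    Decidable (Spec_find_problem_boundaries lines out) := by
  unfold Spec_find_problem_boundaries; infer_instance

-- ===== CLAIM (what is proved, stated in full; the proofs are below) =====
def Claim_equal_find_problem_boundaries : Prop :=
  ∀ (lines : List String), Dom_find_problem_boundaries lines →
    Pre_find_problem_boundaries lines →
    Spec_find_problem_boundaries lines (find_problem_boundaries lines)

-- ===== LEMMAS AND PROOFS =====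

-- occupancy predicate: column c carries a non-space character in some line
def pvOcc (lines : List String) (c : Nat) : Bool :=
  lines.any (fun l => l.toList.getD c ' ' != ' ')

-- interval cover predicate
def pvCov (l : List (Nat × Nat)) (c : Nat) : Bool :=
  l.any (fun p => decide (p.1 ≤ c) && decide (c < p.2))

-- canonical run decomposition of a Bool predicate on Nat
def pvCanon (P : Nat → Bool) (l : List (Nat × Nat)) : Prop :=
  (∀ p ∈ l, p.1 < p.2) ∧ List.IsChain (fun a b => a.2 < b.1) l ∧ ∀ c, P c = pvCov l c

lemma pvCanon_congr (P Q : Nat → Bool) (l : List (Nat × Nat))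
    (h : ∀ c, P c = Q c) (hc : pvCanon P l) : pvCanon Q l :=
  ⟨hc.1, hc.2.1, fun c => (h c) ▸ hc.2.2 c⟩

-- boolean-to-propositional bridges for the cover predicate
lemma pvCov_iff (l : List (Nat × Nat)) (c : Nat) :
    pvCov l c = true ↔ ∃ p ∈ l, p.1 ≤ c ∧ c < p.2 := by
  simp [pvCov]

lemma pvCov_eq_false (l : List (Nat × Nat)) (c : Nat)
    (h : ∀ p ∈ l, ¬ (p.1 ≤ c ∧ c < p.2)) : pvCov l c = false := by
  simp only [pvCov, List.any_eq_false]
  intro p hp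
  have := h p hp
  simp only [Bool.and_eq_true, decide_eq_true_iff, not_and]
  omega

-- in a canonical list, every element after the head starts past the head's end
lemma pvChain_bound (t : List (Nat × Nat)) (a : Nat × Nat)
    (hlt : ∀ p ∈ a :: t, p.1 < p.2)
    (hch : List.IsChain (fun x y => x.2 < y.1) (a :: t)) :
    ∀ q ∈ t, a.2 < q.1 := by
  induction t generalizing a with
  | nil => intro q hq; simp at hq
  | cons b t ih =>
    intro q hq
    have hab : a.2 < b.1 := (List.isChain_cons_cons.mp hch).1
    rcases List.mem_cons.mp hq with rfl | hq
    · exact hab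
    · have := ih b (fun p hp => hlt p (by simp at hp ⊢; tauto)) (List.isChain_cons_cons.mp hch).2 q hq
      have hb := hlt b (by simp)
      omega

-- in a canonical decomposition the head starts at the least covered column
lemma pvCanon_head_min (P : Nat → Bool) (x : Nat × Nat) (v : List (Nat × Nat))
    (hc : pvCanon P (x :: v)) (c : Nat) (hPc : P c = true) : x.1 ≤ c := by
  rw [hc.2.2, pvCov_iff] at hPc
  obtain ⟨p, hp, hle, _⟩ := hPc
  rcases List.mem_cons.mp hp with rfl | hp
  · exact hle
  · have h1 := pvChain_bound v x hc.1 hc.2.1 p hp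
    have h2 := hc.1 x (by simp)
    omega

-- the predicate is false exactly at the head's end column
lemma pvCanon_head_end (P : Nat → Bool) (x : Nat × Nat) (v : List (Nat × Nat))
    (hc : pvCanon P (x :: v)) : P x.2 = false := by
  rw [hc.2.2]
  apply pvCov_eq_false
  intro p hp
  rcases List.mem_cons.mp hp with rfl | hp
  · omega
  · have := pvChain_bound v x hc.1 hc.2.1 p hp
    omega

-- past the head, a canonical decomposition's tail is canonical for the truncated predicate
lemma pvCanon_tail (P : Nat → Bool) (x : Nat × Nat) (v : List (Nat × Nat))
    (hc : pvCanon P (x :: v)) :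
    pvCanon (fun c => decide (x.2 ≤ c) && P c) v := by
  have hbd := pvChain_bound v x hc.1 hc.2.1
  refine ⟨fun p hp => hc.1 p (by simp [hp]), (List.isChain_cons.mp hc.2.1).2, ?_⟩
  intro c
  by_cases hcx : x.2 ≤ c
  · have hxc : (decide (x.1 ≤ c) && decide (c < x.2)) = false := by
      simp only [Bool.and_eq_false_iff, decide_eq_false_iff_not]
      right; omega
    have := hc.2.2 c
    simp only [pvCov, List.any_cons, hxc, Bool.false_or] at this
    simpa [pvCov, hcx] using this
  · have h1 : decide (x.2 ≤ c) = false := by simp; omega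
    simp only [h1, Bool.false_and]
    symm
    apply pvCov_eq_false
    intro p hp
    have := hbd p hp
    omega

-- canonical decompositions are unique
lemma pvCanon_unique (l1 : List (Nat × Nat)) :
    ∀ (P : Nat → Bool) (l2 : List (Nat × Nat)),
      pvCanon P l1 → pvCanon P l2 → l1 = l2 := by
  induction l1 with
  | nil =>
    intro P l2 h1 h2
    cases l2 with
    | nil => rfl
    | cons b u =>
      exfalso
      have hb := h2.1 b (by simp)
      have hP : P b.1 = true := by
        rw [h2.2.2, pvCov_iff]
        exact ⟨b, by simp, le_refl _, hb⟩
      rw [h1.2.2 b.1] at hP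
      simp [pvCov] at hP
  | cons a t ih =>
    intro P l2 h1 h2
    cases l2 with
    | nil =>
      exfalso
      have ha := h1.1 a (by simp)
      have hP : P a.1 = true := by
        rw [h1.2.2, pvCov_iff]
        exact ⟨a, by simp, le_refl _, ha⟩
      rw [h2.2.2 a.1] at hP
      simp [pvCov] at hP
    | cons b u =>
      have ha := h1.1 a (by simp)
      have hb := h2.1 b (by simp)
      have hPa : P a.1 = true := by
        rw [h1.2.2, pvCov_iff]; exact ⟨a, by simp, le_refl _, ha⟩
      have hPb : P b.1 = true := by
        rw [h2.2.2, pvCov_iff]; exact ⟨b, by simp, le_refl _, hb⟩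
      have h11 : a.1 = b.1 :=
        le_antisymm (pvCanon_head_min P a t h1 b.1 hPb) (pvCanon_head_min P b u h2 a.1 hPa)
      have hPe1 := pvCanon_head_end P a t h1
      have hPe2 := pvCanon_head_end P b u h2
      have h22 : a.2 = b.2 := by
        by_contra hne
        rcases Nat.lt_or_ge a.2 b.2 with hlt | hge
        · have : P a.2 = true := by
            rw [h2.2.2, pvCov_iff]
            exact ⟨b, by simp, by omega, hlt⟩
          rw [hPe1] at this; exact absurd this (by simp)
        · have hlt' : b.2 < a.2 := by omega
          have : P b.2 = true := by
            rw [h1.2.2, pvCov_iff]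
            exact ⟨a, by simp, by omega, hlt'⟩
          rw [hPe2] at this; exact absurd this (by simp)
      have hheads : a = b := Prod.ext h11 h22
      have ht1 := pvCanon_tail P a t h1
      have ht2 := pvCanon_tail P b u h2
      rw [← hheads] at ht2
      exact hheads ▸ congrArg₂ List.cons rfl (ih _ u ht1 ht2)

-- ==== A side: the state machine equals the generic run scan on the occupancy mask ====

-- proof-side run scanner over a Bool mask (A's state machine is shown equal to it)
def pvCnt (occ : List Bool) : Nat := (occ.takeWhile id).length

def pvBRuns (c : Nat) : List Bool → List (Nat × Nat)
  | [] => []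
  | b :: rest =>
    if b then
      (c, c + 1 + pvCnt rest) :: pvBRuns (c + 1 + pvCnt rest) (rest.drop (pvCnt rest))
    else
      pvBRuns (c + 1) rest
  termination_by occ => occ.length
  decreasing_by
    · simp only [List.length_drop, List.length_cons]; omega
    · simp only [List.length_cons]; omega

-- the grouping state machine equals the run scan
lemma pv_machine (occ : List Bool) :
    (∀ col probs, pvAFix (pvALoop col probs none (occ.map (fun b => !b))) (col + occ.length)
        = probs ++ pvBRuns col occ)
    ∧ (∀ col s probs, pvAFix (pvALoop col probs (some s) (occ.map (fun b => !b))) (col + occ.length)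
        = probs ++ (s, col + pvCnt occ) :: pvBRuns (col + pvCnt occ) (occ.drop (pvCnt occ))) := by
  induction occ with
  | nil =>
    constructor
    · intro col probs; simp [pvALoop, pvAFix, pvBRuns]
    · intro col s probs; simp [pvALoop, pvAFix, pvBRuns, pvCnt]
  | cons b rest ih =>
    obtain ⟨ihn, ihs⟩ := ih
    have hlen : ∀ col : Nat, col + (b :: rest).length = (col + 1) + rest.length := by
      intro col; simp; omega
    constructor
    · intro col probs
      cases b with
      | false =>
        have hstep : pvALoop col probs none ((false :: rest).map (fun x => !x))
            = pvALoop (col + 1) probs none (rest.map (fun x => !x)) := by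
          simp [pvALoop]
        rw [hstep, hlen col, ihn (col + 1) probs]
        have hrun : pvBRuns col (false :: rest) = pvBRuns (col + 1) rest := by
          simp [pvBRuns]
        rw [hrun]
      | true =>
        have hstep : pvALoop col probs none ((true :: rest).map (fun x => !x))
            = pvALoop (col + 1) probs (some col) (rest.map (fun x => !x)) := by
          simp [pvALoop]
        rw [hstep, hlen col, ihs (col + 1) col probs]
        have hrun : pvBRuns col (true :: rest)
            = (col, col + 1 + pvCnt rest) :: pvBRuns (col + 1 + pvCnt rest) (rest.drop (pvCnt rest)) := by
          simp [pvBRuns]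
        rw [hrun]
    · intro col s probs
      cases b with
      | false =>
        have hstep : pvALoop col probs (some s) ((false :: rest).map (fun x => !x))
            = pvALoop (col + 1) (probs ++ [(s, col)]) none (rest.map (fun x => !x)) := by
          simp [pvALoop]
        rw [hstep, hlen col, ihn (col + 1) (probs ++ [(s, col)])]
        have hcnt : pvCnt (false :: rest) = 0 := by simp [pvCnt, List.takeWhile]
        rw [hcnt]
        have hrun : pvBRuns (col + 0) ((false :: rest).drop 0) = pvBRuns (col + 1) rest := by
          simp [pvBRuns]
        rw [hrun]
        simp
      | true =>
        have hstep : pvALoop col probs (some s) ((true :: rest).map (fun x => !x))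
            = pvALoop (col + 1) probs (some s) (rest.map (fun x => !x)) := by
          simp [pvALoop]
        rw [hstep, hlen col, ihs (col + 1) s probs]
        have hcnt : pvCnt (true :: rest) = pvCnt rest + 1 := by
          simp [pvCnt, List.takeWhile]
        rw [hcnt]
        have hdrop : (true :: rest).drop (pvCnt rest + 1) = rest.drop (pvCnt rest) := by
          simp [List.drop_succ_cons]
        rw [hdrop]
        have : col + (pvCnt rest + 1) = col + 1 + pvCnt rest := by omega
        rw [this]

-- takeWhile facts for the Bool mask
lemma pvCnt_lt (occ : List Bool) : ∀ i, i < pvCnt occ → occ.getD i false = true := by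
  induction occ with
  | nil => intro i h; simp [pvCnt] at h
  | cons b rest ih =>
    intro i h
    cases b with
    | false => simp [pvCnt, List.takeWhile] at h
    | true =>
      cases i with
      | zero => simp
      | succ i =>
        simp [pvCnt, List.takeWhile] at h
        exact ih i (by simpa [pvCnt] using h)

lemma pvCnt_get (occ : List Bool) : occ.getD (pvCnt occ) false = false := by
  induction occ with
  | nil => simp
  | cons b rest ih =>
    cases b with
    | false => simp [pvCnt, List.takeWhile]
    | true => simpa [pvCnt, List.takeWhile] using ih

-- pvBRuns is the canonical decomposition of the shifted mask predicate
lemma pvBRuns_canon (n : Nat) : ∀ (occ : List Bool), occ.length ≤ n → ∀ (c0 : Nat),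
    pvCanon (fun c => decide (c0 ≤ c) && occ.getD (c - c0) false) (pvBRuns c0 occ) := by
  induction n with
  | zero =>
    intro occ h c0
    have : occ = [] := List.eq_nil_of_length_eq_zero (by omega)
    subst this
    exact ⟨by simp [pvBRuns], by simp [pvBRuns], fun c => by simp [pvBRuns, pvCov]⟩
  | succ n ih =>
    intro occ h c0
    cases occ with
    | nil => exact ⟨by simp [pvBRuns], by simp [pvBRuns], fun c => by simp [pvBRuns, pvCov]⟩
    | cons b rest =>
      cases b with
      | false =>
        have hrw : pvBRuns c0 (false :: rest) = pvBRuns (c0 + 1) rest := by simp [pvBRuns]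
        have hcanon := ih rest (by simp at h; omega) (c0 + 1)
        rw [hrw]
        refine pvCanon_congr _ _ _ ?_ hcanon
        intro c
        rcases Nat.lt_trichotomy c c0 with h1 | h1 | h1
        · have : ¬ (c0 ≤ c) := by omega
          have : ¬ (c0 + 1 ≤ c) := by omega
          simp_all
        · subst h1; simp
        · have h2 : c0 ≤ c := by omega
          have h3 : c0 + 1 ≤ c := by omega
          have h4 : c - c0 = (c - (c0 + 1)) + 1 := by omega
          rw [h4]
          simp [h2, h3]
      | true =>
        set k := pvCnt rest with hk
        have hrw : pvBRuns c0 (true :: rest)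
            = (c0, c0 + 1 + k) :: pvBRuns (c0 + 1 + k) (rest.drop k) := by
          simp [pvBRuns, ← hk]
        have hcanon := ih (rest.drop k) (by simp at h ⊢; omega) (c0 + 1 + k)
        rw [hrw]
        have hdropD : ∀ m, (rest.drop k).getD m false = rest.getD (k + m) false := by
          intro m
          simp [List.getD_eq_getElem?_getD, List.getElem?_drop]
        -- no tail element covers c0+1+k
        have hQend : (fun c => decide (c0 + 1 + k ≤ c) && (rest.drop k).getD (c - (c0 + 1 + k)) false) (c0 + 1 + k) = false := by
          simp [hdropD]
          have := pvCnt_get rest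
          simpa [← hk] using this
        refine ⟨?_, ?_, ?_⟩
        · intro p hp
          rcases List.mem_cons.mp hp with rfl | hp
          · simp only []; omega
          · exact hcanon.1 p hp
        · rw [List.isChain_cons]
          refine ⟨?_, hcanon.2.1⟩
          intro q hq
          have hqmem : q ∈ pvBRuns (c0 + 1 + k) (rest.drop k) := List.mem_of_mem_head? hq
          have hqlt := hcanon.1 q hqmem
          have hcovq : pvCov (pvBRuns (c0 + 1 + k) (rest.drop k)) q.1 = true := by
            rw [pvCov_iff]
            exact ⟨q, hqmem, le_refl _, by omega⟩
          have hQ := hcanon.2.2 q.1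
          rw [hcovq] at hQ
          simp only [Bool.and_eq_true, decide_eq_true_iff] at hQ
          obtain ⟨hge, hget⟩ := hQ
          -- q.1 ≥ c0+1+k and it cannot equal c0+1+k (mask false there)
          rcases Nat.lt_or_ge (c0 + 1 + k) q.1 with hlt | hge'
          · exact hlt
          · have hq1 : q.1 = c0 + 1 + k := by omega
            rw [hq1] at hget
            simp only [Nat.sub_self, hdropD, Nat.add_zero] at hget
            have hend := pvCnt_get rest
            rw [← hk] at hend
            rw [hend] at hget
            exact absurd hget (by simp)
        · intro c
          have htail := hcanon.2.2 c
          simp only [] at htail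
          have hcons : pvCov ((c0, c0 + 1 + k) :: pvBRuns (c0 + 1 + k) (rest.drop k)) c
              = ((decide (c0 ≤ c) && decide (c < c0 + 1 + k))
                  || pvCov (pvBRuns (c0 + 1 + k) (rest.drop k)) c) := by
            simp [pvCov, List.any_cons]
          simp only [hcons, ← htail]
          rcases Nat.lt_trichotomy c c0 with h1 | h1 | h1
          · have e1 : decide (c0 ≤ c) = false := by simp; omega
            have e2 : decide (c0 + 1 + k ≤ c) = false := by simp; omega
            rw [e1, e2]
            simp
          · subst h1
            have e2 : decide (c + 1 + k ≤ c) = false := by simp; omega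
            have e5 : c < c + 1 + k := by omega
            rw [e2]
            simp [e5]
          · have e1 : decide (c0 ≤ c) = true := by simp; omega
            have h4 : c - c0 = (c - c0 - 1) + 1 := by omega
            rw [h4, e1]
            simp only [List.getD_cons_succ, Bool.true_and]
            rcases Nat.lt_or_ge c (c0 + 1 + k) with h5 | h5
            · have e2 : decide (c0 + 1 + k ≤ c) = false := by simp; omega
              have e5 : decide (c < c0 + 1 + k) = true := by simp; omega
              have hin : rest.getD (c - c0 - 1) false = true :=
                pvCnt_lt rest _ (by omega)
              rw [e2, e5, hin]
              simp
            · have e2 : decide (c0 + 1 + k ≤ c) = true := by simp; omega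
              have e5 : decide (c < c0 + 1 + k) = false := by simp; omega
              have e4 : k + (c - (c0 + 1 + k)) = c - c0 - 1 := by omega
              rw [e2, e5, hdropD, e4]
              simp
  termination_by n => n

-- ==== A's Nat-level output is canonical for pvOcc ====

lemma pv_max_isSome (lines : List String) (h : lines ≠ []) :
    (PySem.List.max? (lines.map pvLen) id).isSome := by
  rw [Option.isSome_iff_ne_none]
  intro hn
  exact h (by simpa using (PySem.List.max?_eq_none_iff (lines.map pvLen) id).mp hn)

lemma pv_len_le_width (lines : List String) (h : lines ≠ []) (l : String) (hl : l ∈ lines) :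
    pvLen l ≤ (PySem.List.max? (lines.map pvLen) id).getD 0 := by
  obtain ⟨m, hm⟩ := Option.isSome_iff_exists.mp (pv_max_isSome lines h)
  rw [hm]
  exact PySem.List.max?_isMax hm (pvLen l) (List.mem_map_of_mem hl)

-- ljust is transparent to getD once length ≤ width
lemma pv_padded_getD (cs : List Char) (width col : Nat) (_h : cs.length ≤ width) :
    (cs ++ List.replicate (width - cs.length) ' ').getD col ' ' = cs.getD col ' ' := by
  rcases Nat.lt_or_ge col cs.length with hc | hc
  · simp [List.getD_eq_getElem?_getD, List.getElem?_append, hc]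
  · have h1 : cs[col]? = none := List.getElem?_eq_none_iff.mpr (by omega)
    simp only [List.getD_eq_getElem?_getD, List.getElem?_append, Nat.not_lt.mpr hc, if_false,
      h1, List.getElem?_replicate]
    split <;> rfl

lemma pv_all_congr_mem {α : Type} (l : List α) (p q : α → Bool)
    (h : ∀ x, x ∈ l → p x = q x) : l.all p = l.all q := by
  induction l with
  | nil => rfl
  | cons a t ih =>
    simp only [List.all_cons]
    rw [h a (by simp), ih (fun x hx => h x (by simp [hx]))]

-- De Morgan over the rows: not-all-spaces = some non-space
lemma pv_not_all (ls : List String) (c : Nat) :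
    (!(ls.all (fun l => l.toList.getD c ' ' == ' ')))
      = ls.any (fun l => l.toList.getD c ' ' != ' ') := by
  induction ls with
  | nil => simp
  | cons a t ih =>
    simp only [List.all_cons, List.any_cons, Bool.not_and]
    rw [ih]
    rfl

-- the (negated separator) mask is pointwise the occupancy predicate
lemma pv_mask_getD (lines : List String) (h : lines ≠ []) (c : Nat) :
    (((List.range ((PySem.List.max? (lines.map pvLen) id).getD 0)).map
        (fun col => (lines.map (fun l =>
            l.toList ++ List.replicate ((PySem.List.max? (lines.map pvLen) id).getD 0 - pvLen l) ' ')).all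
          (fun row => row.getD col ' ' == ' '))).map (fun b => !b)).getD c false
      = pvOcc lines c := by
  set width := (PySem.List.max? (lines.map pvLen) id).getD 0 with hw
  set sep := (List.range width).map
    (fun col => (lines.map (fun l =>
        l.toList ++ List.replicate (width - pvLen l) ' ')).all
      (fun row => row.getD col ' ' == ' ')) with hsep
  rcases Nat.lt_or_ge c width with hc | hc
  · have hlen : c < (sep.map (fun b : Bool => !b)).length := by simp [hsep, hc]
    have hclen : c < sep.length := by simp [hsep, hc]
    rw [List.getD_eq_getElem?_getD, List.getElem?_eq_getElem hlen]
    simp only [Option.getD_some, List.getElem_map]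
    have hsepc : sep[c]'hclen = (lines.map (fun l =>
        l.toList ++ List.replicate (width - pvLen l) ' ')).all (fun row => row.getD c ' ' == ' ') := by
      simp [hsep]
    rw [hsepc, List.all_map]
    rw [pv_all_congr_mem lines _ _ (fun l hl => by
      simp only [Function.comp]
      rw [show pvLen l = l.toList.length from rfl,
        pv_padded_getD l.toList width c (pv_len_le_width lines h l hl)])]
    exact pv_not_all lines c
  · have hlen2 : (sep.map (fun b : Bool => !b)).length = width := by
      rw [List.length_map, hsep, List.length_map, List.length_range]
    have hnone : (sep.map (fun b : Bool => !b)).getD c false = false := by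
      rw [List.getD_eq_getElem?_getD, List.getElem?_eq_none_iff.mpr (by rw [hlen2]; omega)]
      rfl
    rw [hnone]
    unfold pvOcc
    symm
    simp only [List.any_eq_false]
    intro l hl
    have hlw := pv_len_le_width lines h l hl
    have hnil : l.toList[c]? = none := List.getElem?_eq_none_iff.mpr (le_trans hlw hc)
    simp [List.getD_eq_getElem?_getD, hnil]

lemma pvA_canon (lines : List String) (h : lines ≠ []) :
    pvCanon (pvOcc lines)
      (pvAFix (pvALoop 0 [] none
        ((List.range ((PySem.List.max? (lines.map pvLen) id).getD 0)).map
          (fun col => (lines.map (fun l =>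
              l.toList ++ List.replicate ((PySem.List.max? (lines.map pvLen) id).getD 0 - pvLen l) ' ')).all
            (fun row => row.getD col ' ' == ' '))))
        ((PySem.List.max? (lines.map pvLen) id).getD 0)) := by
  set width := (PySem.List.max? (lines.map pvLen) id).getD 0 with hw
  set sep := (List.range width).map
    (fun col => (lines.map (fun l =>
        l.toList ++ List.replicate (width - pvLen l) ' ')).all
      (fun row => row.getD col ' ' == ' ')) with hsep
  have hinv : (sep.map (fun b => !b)).map (fun b => !b) = sep := by
    have hcomp : ((fun b : Bool => !b) ∘ fun b : Bool => !b) = id := by funext b; simp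
    rw [List.map_map, hcomp, List.map_id]
  have hm := (pv_machine (sep.map (fun b => !b))).1 0 []
  rw [hinv] at hm
  have hlen : (sep.map (fun b : Bool => !b)).length = width := by simp [hsep]
  rw [hlen] at hm
  simp only [Nat.zero_add, List.nil_append] at hm
  rw [hm]
  have hcanon := pvBRuns_canon (sep.map (fun b : Bool => !b)).length _ (le_refl _) 0
  refine pvCanon_congr _ _ _ ?_ hcanon
  intro c
  have := pv_mask_getD lines h c
  rw [← hw, ← hsep] at this
  simpa using this

-- ==== B side ====

-- takeWhile facts for the character scan
lemma pvCntNS_lt (cs : List Char) : ∀ i, i < pvCntNS cs → (cs.getD i ' ' != ' ') = true := by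
  induction cs with
  | nil => intro i h; simp [pvCntNS] at h
  | cons ch rest ih =>
    intro i h
    by_cases hch : ch = ' '
    · have hb : (ch != ' ') = false := by simp [hch]
      simp [pvCntNS, List.takeWhile, hb] at h
    · have hb : (ch != ' ') = true := by simp [hch]
      cases i with
      | zero => simp [hch]
      | succ i =>
        simp [pvCntNS, List.takeWhile, hb] at h
        exact ih i (by simpa [pvCntNS] using h)

lemma pvCntNS_get (cs : List Char) : cs.getD (pvCntNS cs) ' ' = ' ' := by
  induction cs with
  | nil => simp
  | cons ch rest ih =>
    by_cases hch : ch = ' '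
    · have hb : (ch != ' ') = false := by simp [hch]
      simp [pvCntNS, List.takeWhile, hb, hch]
    · have hb : (ch != ' ') = true := by simp [hch]
      simpa [pvCntNS, List.takeWhile, hb] using ih

-- pvRowRuns is the canonical decomposition of the shifted row predicate
lemma pvRowRuns_canon (n : Nat) : ∀ (cs : List Char), cs.length ≤ n → ∀ (c0 : Nat),
    pvCanon (fun c => decide (c0 ≤ c) && (cs.getD (c - c0) ' ' != ' ')) (pvRowRuns c0 cs) := by
  induction n with
  | zero =>
    intro cs h c0
    have : cs = [] := List.eq_nil_of_length_eq_zero (by omega)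
    subst this
    exact ⟨by simp [pvRowRuns], by simp [pvRowRuns], fun c => by simp [pvRowRuns, pvCov]⟩
  | succ n ih =>
    intro cs h c0
    cases cs with
    | nil => exact ⟨by simp [pvRowRuns], by simp [pvRowRuns], fun c => by simp [pvRowRuns, pvCov]⟩
    | cons ch rest =>
      by_cases hch : ch = ' '
      · have hrw : pvRowRuns c0 (ch :: rest) = pvRowRuns (c0 + 1) rest := by
          simp [pvRowRuns, hch]
        have hcanon := ih rest (by simp at h; omega) (c0 + 1)
        rw [hrw]
        refine pvCanon_congr _ _ _ ?_ hcanon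
        intro c
        rcases Nat.lt_trichotomy c c0 with h1 | h1 | h1
        · have e1 : ¬ (c0 ≤ c) := by omega
          have e2 : ¬ (c0 + 1 ≤ c) := by omega
          simp [e1, e2]
        · subst h1; simp [hch]
        · have h2 : c0 ≤ c := by omega
          have h3 : c0 + 1 ≤ c := by omega
          have h4 : c - c0 = (c - (c0 + 1)) + 1 := by omega
          rw [h4]
          simp [h2, h3]
      · set k := pvCntNS rest with hk
        have hne : (ch == ' ') = false := by simp [hch]
        have hrw : pvRowRuns c0 (ch :: rest)
            = (c0, c0 + 1 + k) :: pvRowRuns (c0 + 1 + k) (rest.drop k) := by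
          simp [pvRowRuns, hne, ← hk]
        have hcanon := ih (rest.drop k) (by simp at h ⊢; omega) (c0 + 1 + k)
        rw [hrw]
        have hdropD : ∀ m, (rest.drop k).getD m ' ' = rest.getD (k + m) ' ' := by
          intro m
          simp [List.getD_eq_getElem?_getD, List.getElem?_drop]
        have hrestk : rest.getD k ' ' = ' ' := by
          have := pvCntNS_get rest; rwa [← hk] at this
        refine ⟨?_, ?_, ?_⟩
        · intro p hp
          rcases List.mem_cons.mp hp with rfl | hp
          · simp only []; omega
          · exact hcanon.1 p hp
        · rw [List.isChain_cons]
          refine ⟨?_, hcanon.2.1⟩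
          intro q hq
          have hqmem : q ∈ pvRowRuns (c0 + 1 + k) (rest.drop k) := List.mem_of_mem_head? hq
          have hqlt := hcanon.1 q hqmem
          have hcovq : pvCov (pvRowRuns (c0 + 1 + k) (rest.drop k)) q.1 = true := by
            rw [pvCov_iff]
            exact ⟨q, hqmem, le_refl _, by omega⟩
          have hQ := hcanon.2.2 q.1
          rw [hcovq] at hQ
          simp only [Bool.and_eq_true, decide_eq_true_iff] at hQ
          obtain ⟨hge, hget⟩ := hQ
          rcases Nat.lt_or_ge (c0 + 1 + k) q.1 with hlt | hge'
          · exact hlt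
          · have hq1 : q.1 = c0 + 1 + k := by omega
            rw [hq1] at hget
            simp only [Nat.sub_self, hdropD, Nat.add_zero] at hget
            rw [hrestk] at hget
            exact absurd hget (by simp)
        · intro c
          have htail := hcanon.2.2 c
          simp only [] at htail
          have hcons : pvCov ((c0, c0 + 1 + k) :: pvRowRuns (c0 + 1 + k) (rest.drop k)) c
              = ((decide (c0 ≤ c) && decide (c < c0 + 1 + k))
                  || pvCov (pvRowRuns (c0 + 1 + k) (rest.drop k)) c) := by
            simp [pvCov, List.any_cons]
          simp only [hcons, ← htail]
          rcases Nat.lt_trichotomy c c0 with h1 | h1 | h1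
          · have e1 : decide (c0 ≤ c) = false := by simp; omega
            have e2 : decide (c0 + 1 + k ≤ c) = false := by simp; omega
            rw [e1, e2]
            simp
          · subst h1
            have e2 : decide (c + 1 + k ≤ c) = false := by simp; omega
            have e5 : c < c + 1 + k := by omega
            rw [e2]
            simp [e5, hch]
          · have e1 : decide (c0 ≤ c) = true := by simp; omega
            have h4 : c - c0 = (c - c0 - 1) + 1 := by omega
            rw [h4, e1]
            simp only [List.getD_cons_succ, Bool.true_and]
            rcases Nat.lt_or_ge c (c0 + 1 + k) with h5 | h5
            · have e2 : decide (c0 + 1 + k ≤ c) = false := by simp; omega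
              have e5 : decide (c < c0 + 1 + k) = true := by simp; omega
              have hin : (rest.getD (c - c0 - 1) ' ' != ' ') = true :=
                pvCntNS_lt rest _ (by omega)
              rw [e2, e5, hin]
              simp
            · have e2 : decide (c0 + 1 + k ≤ c) = true := by simp; omega
              have e5 : decide (c < c0 + 1 + k) = false := by simp; omega
              have e4 : k + (c - (c0 + 1 + k)) = c - c0 - 1 := by omega
              rw [e2, e5, hdropD, e4]
              simp
  termination_by n => n

-- the collected interval list covers exactly the occupied columns
lemma pvIntervals_cov (lines : List String) (c : Nat) :
    pvCov (pvIntervals lines) c = pvOcc lines c := by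
  unfold pvIntervals pvOcc
  have hrow : ∀ (l : String), pvCov (pvRowRuns 0 l.toList) c = (l.toList.getD c ' ' != ' ') := by
    intro l
    have := (pvRowRuns_canon l.toList.length l.toList (le_refl _) 0).2.2 c
    simp at this
    exact this.symm
  have hgen : ∀ (ls : List String) (init : List (Nat × Nat)),
      pvCov (ls.foldl (fun acc l => acc ++ pvRowRuns 0 l.toList) init) c
        = (pvCov init c || ls.any (fun l => l.toList.getD c ' ' != ' ')) := by
    intro ls
    induction ls with
    | nil => intro init; simp
    | cons a t iht =>
      intro init
      simp only [List.foldl_cons, List.any_cons]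
      rw [iht]
      have : pvCov (init ++ pvRowRuns 0 a.toList) c
          = (pvCov init c || pvCov (pvRowRuns 0 a.toList) c) := by
        simp [pvCov, List.any_append]
      rw [this, hrow a, Bool.or_assoc]
  have := hgen lines []
  simpa [pvCov] using this

-- intervals all have start < end
lemma pvIntervals_lt (lines : List String) :
    ∀ p ∈ pvIntervals lines, p.1 < p.2 := by
  unfold pvIntervals
  have hgen : ∀ (ls : List String) (init : List (Nat × Nat)),
      (∀ p ∈ init, p.1 < p.2) →
      ∀ p ∈ ls.foldl (fun acc l => acc ++ pvRowRuns 0 l.toList) init, p.1 < p.2 := by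
    intro ls
    induction ls with
    | nil => intro init h; exact h
    | cons a t iht =>
      intro init h
      simp only [List.foldl_cons]
      refine iht _ ?_
      intro p hp
      rcases List.mem_append.mp hp with hp | hp
      · exact h p hp
      · exact (pvRowRuns_canon a.toList.length a.toList (le_refl _) 0).1 p hp
  exact hgen lines [] (by simp)

-- reversed-chain invariant for the merge accumulator
def pvRevOK (acc : List (Nat × Nat)) : Prop :=
  (∀ p ∈ acc, p.1 < p.2) ∧ List.IsChain (fun a b => b.2 < a.1) acc

-- two booleans are equal when their truth conditions agree
lemma pvBool_eq {a b : Bool} (h : a = true ↔ b = true) : a = b := by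
  cases a <;> cases b <;> simp_all

-- the merge fold: keeps the reversed-chain invariant and computes the union cover
lemma pvMerge_ind (l : List (Nat × Nat)) :
    ∀ (acc : List (Nat × Nat)),
      List.Pairwise (fun a b => a.1 ≤ b.1) l →
      (∀ p ∈ l, p.1 < p.2) →
      pvRevOK acc →
      (∀ q ∈ l, ∀ h t, acc = h :: t → h.1 ≤ q.1) →
      pvRevOK (l.foldl pvMergeStep acc)
        ∧ ∀ c, pvCov (l.foldl pvMergeStep acc) c = (pvCov acc c || pvCov l c) := by
  induction l with
  | nil => intro acc _ _ hok _; exact ⟨hok, fun c => by simp [pvCov]⟩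
  | cons p l ih =>
    intro acc hpw hlt hok hbd
    have hp : p.1 < p.2 := hlt p (by simp)
    have hple : ∀ q ∈ l, p.1 ≤ q.1 := fun q hq => (List.pairwise_cons.mp hpw).1 q hq
    -- facts about one step
    have hstep : pvRevOK (pvMergeStep acc p)
        ∧ (∀ c, pvCov (pvMergeStep acc p) c = (pvCov acc c || (decide (p.1 ≤ c) && decide (c < p.2))))
        ∧ (∀ q ∈ l, ∀ h t, pvMergeStep acc p = h :: t → h.1 ≤ q.1) := by
      match acc, hok, hbd with
      | [], _, _ =>
        refine ⟨⟨fun q hq => by simp [pvMergeStep] at hq; simp [hq, hp], by simp [pvMergeStep]⟩,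
          fun c => by simp [pvMergeStep, pvCov], ?_⟩
        intro q hq h t heq
        simp [pvMergeStep] at heq
        rw [← heq.1]
        exact hple q hq
      | (s0, e0) :: rest, hok, hbd =>
        have hs0p : s0 ≤ p.1 := hbd p (by simp) (s0, e0) rest rfl
        have hs0e0 : s0 < e0 := hok.1 (s0, e0) (by simp)
        by_cases h1 : p.1 ≤ e0
        · by_cases h2 : e0 < p.2
          · have heq : pvMergeStep ((s0, e0) :: rest) p = (s0, p.2) :: rest := by
              simp [pvMergeStep, h1, h2]
            refine ⟨⟨?_, ?_⟩, ?_, ?_⟩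
            · rw [heq]; intro q hq
              rcases List.mem_cons.mp hq with rfl | hq
              · simp only []; omega
              · exact hok.1 q (by simp [hq])
            · rw [heq]
              have hok2 := List.isChain_cons.mp hok.2
              rw [List.isChain_cons]
              exact ⟨fun b hb => by have := hok2.1 b hb; simp at this ⊢; omega, hok2.2⟩
            · intro c
              rw [heq]
              simp only [pvCov, List.any_cons]
              apply pvBool_eq
              simp only [Bool.or_eq_true, Bool.and_eq_true, decide_eq_true_iff]
              constructor
              · rintro (h' | h')
                · rcases Nat.lt_or_ge c e0 with hce | hce
                  · exact Or.inl (Or.inl ⟨h'.1, hce⟩)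
                  · exact Or.inr ⟨by omega, h'.2⟩
                · exact Or.inl (Or.inr h')
              · rintro ((h' | h') | h')
                · exact Or.inl ⟨h'.1, by omega⟩
                · exact Or.inr h'
                · exact Or.inl ⟨by omega, h'.2⟩
            · intro q hq h t heq'
              rw [heq] at heq'
              cases heq'
              exact le_trans hs0p (hple q hq)
          · have heq : pvMergeStep ((s0, e0) :: rest) p = (s0, e0) :: rest := by
              simp [pvMergeStep, h1, h2]
            refine ⟨by rw [heq]; exact hok, ?_, ?_⟩
            · intro c
              rw [heq]
              simp only [pvCov, List.any_cons]
              apply pvBool_eq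
              simp only [Bool.or_eq_true, Bool.and_eq_true, decide_eq_true_iff]
              constructor
              · exact fun h' => Or.inl h'
              · rintro (h' | h')
                · exact h'
                · exact Or.inl ⟨by omega, by omega⟩
            · intro q hq h t heq'
              rw [heq] at heq'
              cases heq'
              exact le_trans hs0p (hple q hq)
        · have heq : pvMergeStep ((s0, e0) :: rest) p = p :: (s0, e0) :: rest := by
            simp [pvMergeStep, h1]
          refine ⟨⟨?_, ?_⟩, ?_, ?_⟩
          · rw [heq]; intro q hq
            rcases List.mem_cons.mp hq with rfl | hq
            · exact hp
            · exact hok.1 q hq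
          · rw [heq, List.isChain_cons_cons]
            exact ⟨by simp; omega, hok.2⟩
          · intro c
            rw [heq]
            simp only [pvCov, List.any_cons]
            apply pvBool_eq
            simp only [Bool.or_eq_true]
            tauto
          · intro q hq h t heq'
            rw [heq] at heq'
            cases heq'
            exact hple q hq
    have := ih (pvMergeStep acc p) (List.pairwise_cons.mp hpw).2
      (fun q hq => hlt q (by simp [hq])) hstep.1 hstep.2.2
    refine ⟨this.1, ?_⟩
    intro c
    rw [List.foldl_cons] at *
    rw [this.2 c, hstep.2.1 c]
    simp [pvCov, List.any_cons, Bool.or_assoc]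

-- B's Nat-level output is canonical for pvOcc
lemma pvB_canon (lines : List String) :
    pvCanon (pvOcc lines)
      (((PySem.List.sorted (pvIntervals lines) (fun t => t.1) false).foldl pvMergeStep []).reverse) := by
  set sl := PySem.List.sorted (pvIntervals lines) (fun t => t.1) false with hsl
  have hperm : sl.Perm (pvIntervals lines) := PySem.List.sorted_perm _ _ _
  have hpw : List.Pairwise (fun a b : Nat × Nat => a.1 ≤ b.1) sl := by
    have := PySem.List.sorted_pairwise (xs := pvIntervals lines) (key := fun t : Nat × Nat => t.1)
    simpa [← hsl] using this
  have hlt : ∀ p ∈ sl, p.1 < p.2 := fun p hp =>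
    pvIntervals_lt lines p (hperm.mem_iff.mp hp)
  have hm := pvMerge_ind sl [] hpw hlt ⟨fun p hp => absurd hp (by simp), List.IsChain.nil⟩
    (by intro q hq h t heq; simp at heq)
  set r := sl.foldl pvMergeStep [] with hr
  refine ⟨?_, ?_, ?_⟩
  · intro p hp
    exact hm.1.1 p (by simpa using hp)
  · rw [List.isChain_reverse]
    exact hm.1.2
  · intro c
    have hcovrev : pvCov r.reverse c = pvCov r c := by simp [pvCov]
    rw [hcovrev, hm.2 c]
    have hslcov : pvCov sl c = pvCov (pvIntervals lines) c := by
      apply pvBool_eq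
      simp only [pvCov, List.any_eq_true]
      constructor
      · rintro ⟨p, hp, hc⟩; exact ⟨p, hperm.mem_iff.mp hp, hc⟩
      · rintro ⟨p, hp, hc⟩; exact ⟨p, hperm.mem_iff.mpr hp, hc⟩
    rw [hslcov, pvIntervals_cov lines c]
    simp [pvCov]

-- ===== VERDICT (by name: the statements are the Claim_ definitions above) =====
theorem find_problem_boundaries_spec : Claim_equal_find_problem_boundaries := by
  intro lines _ hpre
  unfold Spec_find_problem_boundaries find_problem_boundaries find_problem_boundaries_alt
  simp only []
  have hA := pvA_canon lines hpre
  have hB := pvB_canon lines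
  rw [pvCanon_unique _ _ _ hA hB]
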